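-- pv_equiv track=rewrite | github.com/CluelessCoder73/ExactCut-Video-Tools | obsolete/older_versions/vdscript_range_adjuster_v1.4.0.py | find_next_p_or_i_frame
-- ===== SOURCE A (Python) =====
-- def find_next_p_or_i_frame(frame_num, frame_types):
--     max_frame = max(frame_types.keys())
--     next_frame = frame_num + 1
--     while next_frame <= max_frame:
--         if frame_types.get(next_frame) in ['I', 'P']:
--             return next_frame
--         next_frame += 1
--     return None
-- ===== SOURCE B (Python) =====
-- def find_next_p_or_i_frame(frame_num, frame_types):
--     # Filter the actual keys, then take the minimum, instead of probing
--     # consecutive integers one by one.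
--     candidates = [k for k in frame_types
--                   if frame_num < k and frame_types[k] in ('I', 'P')]
--     return min(candidates) if candidates else None
-- ===== Notes on version B (the rewrite author's own statement) =====
-- stated objective: faster
-- what changed: Replaces the forward scan over every consecutive integer from frame_num+1 up to max(keys) with a single pass over the dict's actual keys (filter keys > frame_num typed I/P, then min), so no integer between keys is ever probed and no per-integer dict.get is made.
import Mathlib
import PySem

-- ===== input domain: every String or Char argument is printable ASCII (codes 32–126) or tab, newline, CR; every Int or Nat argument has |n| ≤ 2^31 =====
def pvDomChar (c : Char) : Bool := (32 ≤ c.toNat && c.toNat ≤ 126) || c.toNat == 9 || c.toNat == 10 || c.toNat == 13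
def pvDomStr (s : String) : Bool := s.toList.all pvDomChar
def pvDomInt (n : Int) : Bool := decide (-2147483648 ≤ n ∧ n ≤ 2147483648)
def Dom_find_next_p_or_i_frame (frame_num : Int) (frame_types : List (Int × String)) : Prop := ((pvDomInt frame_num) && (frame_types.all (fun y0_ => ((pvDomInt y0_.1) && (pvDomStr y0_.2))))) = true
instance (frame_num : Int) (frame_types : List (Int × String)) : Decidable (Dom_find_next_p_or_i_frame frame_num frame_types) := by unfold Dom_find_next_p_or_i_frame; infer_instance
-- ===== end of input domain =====

-- B replaces A's integer-by-integer forward scan with a filter-then-minimum over the dict's actual keys (alternative decomposition; return value only).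


-- ===== PORT A =====
-- dict.get (first-match lookup on the association list)
def pvGet (d : List (Int × String)) (n : Int) : Option String :=
  (d.find? (fun p => p.1 == n)).map Prod.snd

-- frame_types.get(n) in ['I', 'P']
def pvIsIP (d : List (Int × String)) (n : Int) : Bool :=
  pvGet d n == some "I" || pvGet d n == some "P"

-- the while loop of A
def pvLoopA (d : List (Int × String)) (maxf n : Int) : Option Int :=
  if n ≤ maxf then
    if pvIsIP d n then some n else pvLoopA d maxf (n + 1)
  else none
termination_by (maxf + 1 - n).toNat
decreasing_by omega

def find_next_p_or_i_frame (frame_num : Int) (frame_types : List (Int × String)) : Option Int :=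
  match PySem.List.max? (frame_types.map Prod.fst) (fun x => x) with
  | none => none   -- unreachable under Pre_: Python's max() raises ValueError on an empty dict
  | some maxf => pvLoopA frame_types maxf (frame_num + 1)

-- ===== PORT B =====
def find_next_p_or_i_frame_alt (frame_num : Int) (frame_types : List (Int × String)) : Option Int :=
  PySem.List.min?
    ((frame_types.map Prod.fst).filter (fun k => decide (frame_num < k) && pvIsIP frame_types k))
    (fun x => x)

-- ===== PRECONDITION & SPEC =====
-- Pre_ excludes only the empty dict, on which A's max() raises ValueError.
def Pre_find_next_p_or_i_frame (frame_num : Int) (frame_types : List (Int × String)) : Prop := frame_types ≠ []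
instance (frame_num : Int) (frame_types : List (Int × String)) : Decidable (Pre_find_next_p_or_i_frame frame_num frame_types) := by unfold Pre_find_next_p_or_i_frame; infer_instance

def pvWitness_find_next_p_or_i_frame : Int × (List (Int × String)) := (0, [(1, "B"), (2, "P")])

def Spec_find_next_p_or_i_frame (frame_num : Int) (frame_types : List (Int × String)) (out : Option Int) : Prop := out = find_next_p_or_i_frame_alt frame_num frame_types
instance (frame_num : Int) (frame_types : List (Int × String)) (out : Option Int) : Decidable (Spec_find_next_p_or_i_frame frame_num frame_types out) := by unfold Spec_find_next_p_or_i_frame; infer_instance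

-- ===== CLAIM (what is proved, stated in full; the proofs are below) =====
def Claim_equal_find_next_p_or_i_frame : Prop := ∀ (frame_num : Int) (frame_types : List (Int × String)), Dom_find_next_p_or_i_frame frame_num frame_types → Pre_find_next_p_or_i_frame frame_num frame_types → Spec_find_next_p_or_i_frame frame_num frame_types (find_next_p_or_i_frame frame_num frame_types)


-- ===== LEMMAS AND PROOFS =====

-- a frame that the predicate accepts is a key of the dict
theorem pvIsIP_mem {d : List (Int × String)} {n : Int} (h : pvIsIP d n = true) :
    n ∈ d.map Prod.fst := by
  have hg : (d.find? (fun p => p.1 == n)).isSome := by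
    unfold pvIsIP pvGet at h
    rcases hf : d.find? (fun p => p.1 == n) with _ | p
    · simp [hf] at h
    · simp [hf]
  rcases Option.isSome_iff_exists.mp hg with ⟨p, hp⟩
  have hmem := List.mem_of_find?_eq_some hp
  have heq : p.1 = n := by simpa using List.find?_some hp
  exact heq ▸ List.mem_map_of_mem hmem

theorem pvLoopA_none (d : List (Int × String)) (maxf lo : Int)
    (h : ∀ j, lo ≤ j → j ≤ maxf → pvIsIP d j = false) :
    pvLoopA d maxf lo = none := by
  unfold pvLoopA
  split
  · rename_i h1
    rw [if_neg (by simp [h lo le_rfl h1])]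
    exact pvLoopA_none d maxf (lo + 1) (fun j hj hj2 => h j (by omega) hj2)
  · rfl
termination_by (maxf + 1 - lo).toNat
decreasing_by omega

theorem pvLoopA_find (d : List (Int × String)) (maxf lo m : Int)
    (hlo : lo ≤ m) (hm : m ≤ maxf) (hp : pvIsIP d m = true)
    (hmin : ∀ j, lo ≤ j → j < m → pvIsIP d j = false) :
    pvLoopA d maxf lo = some m := by
  unfold pvLoopA
  rw [if_pos (by omega)]
  by_cases h2 : pvIsIP d lo = true
  · rw [if_pos h2]
    have : lo = m := by
      by_contra hne
      have := hmin lo le_rfl (by omega)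
      simp [this] at h2
    simp [this]
  · rw [if_neg h2]
    have hne : lo ≠ m := fun e => h2 (e ▸ hp)
    exact pvLoopA_find d maxf (lo + 1) m (by omega) hm hp
      (fun j hj hj2 => hmin j (by omega) hj2)
termination_by (maxf + 1 - lo).toNat
decreasing_by omega

-- ===== VERDICT (by name: the statement is the Claim_ definition above) =====
theorem find_next_p_or_i_frame_spec : Claim_equal_find_next_p_or_i_frame := by
  intro fn d _dom hpre
  unfold Spec_find_next_p_or_i_frame find_next_p_or_i_frame find_next_p_or_i_frame_alt
  have hkeys : d.map Prod.fst ≠ [] := by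
    simpa using hpre
  rcases hmax : PySem.List.max? (d.map Prod.fst) (fun x => x) with _ | maxf
  · exact absurd (((PySem.List.max?_eq_none_iff _ _).mp hmax)) hkeys
  have hub : ∀ k ∈ d.map Prod.fst, k ≤ maxf := fun k hk =>
    PySem.List.max?_isMax hmax k hk
  set cands := (d.map Prod.fst).filter (fun k => decide (fn < k) && pvIsIP d k) with hc
  have hcand : ∀ j, fn < j → pvIsIP d j = true → j ∈ cands := by
    intro j h1 h2
    exact List.mem_filter.mpr ⟨pvIsIP_mem h2, by simp [h1, h2]⟩
  rcases hmin : PySem.List.min? cands (fun x => x) with _ | m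
  · -- no candidate: the scan falls through
    have hempty : cands = [] := ((PySem.List.min?_eq_none_iff _ _).mp hmin)
    simp only
    apply pvLoopA_none
    intro j hj _
    by_contra hb
    have : j ∈ cands := hcand j (by omega) (by simpa using hb)
    simp [hempty] at this
  · have hmem : m ∈ cands := PySem.List.min?_mem hmin
    have hlb : ∀ y ∈ cands, m ≤ y := fun y hy => PySem.List.min?_isMin hmin y hy
    have hmem' := List.mem_filter.mp hmem
    have hfn : fn < m := by
      have := hmem'.2; simp at this; exact this.1
    have hp : pvIsIP d m = true := by
      have := hmem'.2; simp at this; exact this.2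
    simp only
    apply pvLoopA_find d maxf (fn + 1) m (by omega) (hub m hmem'.1) hp
    intro j hj hjm
    by_contra hb
    have : j ∈ cands := hcand j (by omega) (by simpa using hb)
    have := hlb j this
    omega
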